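-- pv_equiv track=rewrite | github.com/newkimjiwon/CodingTest | BAEKJOON/S4/1059번_좋은 구간.py | solution
-- ===== SOURCE A (Python) =====
-- def solution(L, S, N):
--     S.sort()  # 반드시 정렬
--
--     # n이 S 안에 있다면 좋은 구간은 존재하지 않음
--     if N in S:
--         return 0
--
--     # n보다 작은 수 중 최댓값, n보다 큰 수 중 최솟값
--     left, right = 0, 1001
--     for s in S:
--         if s < N:
--             left = max(left, s)
--         elif s > N:
--             right = min(right, s)
--
--     # 공식 적용
--     return (N - left) * (right - N) - 1
-- ===== SOURCE B (Python) =====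
-- def _bisect_left(a, x):
--     lo, hi = 0, len(a)
--     while lo < hi:
--         mid = (lo + hi) // 2
--         if a[mid] < x:
--             lo = mid + 1
--         else:
--             hi = mid
--     return lo
--
--
-- def solution(L, S, N):
--     S.sort()  # keep A's in-place sort side effect
--     i = _bisect_left(S, N)
--     if i < len(S) and S[i] == N:
--         return 0
--     left = max(0, S[i - 1]) if i > 0 else 0
--     right = min(1001, S[i]) if i < len(S) else 1001
--     return (N - left) * (right - N) - 1
-- ===== Notes on version B (the rewrite author's own statement) =====
-- stated objective: alternative
-- what changed: Replaces A's full linear scan for the nearest neighbours of N by a binary search for N's insertion index in the sorted list, reading membership, left neighbour and right neighbour off that index; total cost stays sort-dominated.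
import Mathlib
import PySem

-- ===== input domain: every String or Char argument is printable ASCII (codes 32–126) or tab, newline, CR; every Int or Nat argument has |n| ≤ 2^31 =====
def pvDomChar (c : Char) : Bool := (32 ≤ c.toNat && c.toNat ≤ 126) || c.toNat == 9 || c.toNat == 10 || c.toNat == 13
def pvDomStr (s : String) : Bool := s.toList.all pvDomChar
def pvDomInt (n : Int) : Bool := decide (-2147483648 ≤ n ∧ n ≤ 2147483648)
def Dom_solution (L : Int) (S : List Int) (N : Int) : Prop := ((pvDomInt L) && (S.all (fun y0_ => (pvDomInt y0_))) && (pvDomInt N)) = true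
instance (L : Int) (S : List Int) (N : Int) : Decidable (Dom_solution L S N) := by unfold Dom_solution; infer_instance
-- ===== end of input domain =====

-- B replaces A's linear nearest-neighbour scan by a hand-written binary search for N's
-- insertion index in the sorted list, reading membership and both neighbours off that index.
-- A sorts S in place; the equivalence proved here is about the return value only
-- (B performs the same in-place sort).

-- ===== PORT A =====
def solution (L : Int) (S : List Int) (N : Int) : Int :=
  let T := PySem.List.sorted S (fun x => x) false   -- S.sort()
  if N ∈ T then 0
  else
    -- left, right = 0, 1001; one pass over the (sorted) list
    let p := T.foldl (fun (lr : Int × Int) s =>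
      if s < N then (max lr.1 s, lr.2)
      else if s > N then (lr.1, min lr.2 s)
      else lr) (0, 1001)
    (N - p.1) * (p.2 - N) - 1

-- ===== PORT B =====
-- transcription of Source B's _bisect_left while-loop (fuel = initial hi-lo bound = length;
-- Python's nonnegative lo, hi and '//' coincide with Nat arithmetic here)
def bsearchLoop (xs : List Int) (x : Int) : Nat → Nat → Nat → Nat
  | 0, lo, _ => lo
  | fuel + 1, lo, hi =>
    if lo < hi then
      match xs[(lo + hi) / 2]? with
      | some y =>
        if y < x then bsearchLoop xs x fuel ((lo + hi) / 2 + 1) hi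
        else bsearchLoop xs x fuel lo ((lo + hi) / 2)
      | none => lo
    else lo

def bisectLeftB (xs : List Int) (x : Int) : Nat :=
  bsearchLoop xs x xs.length 0 xs.length

def solution_alt (L : Int) (S : List Int) (N : Int) : Int :=
  let T := PySem.List.sorted S (fun x => x) false   -- S.sort()
  let i := bisectLeftB T N
  if i < T.length && (T[i]?.getD 0) == N then 0
  else
    let left : Int := if 0 < i then max 0 (T[i - 1]?.getD 0) else 0
    let right : Int := if i < T.length then min 1001 (T[i]?.getD 0) else 1001
    (N - left) * (right - N) - 1

-- ===== PRECONDITION & SPEC =====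
def Spec_solution (L : Int) (S : List Int) (N : Int) (out : Int) : Prop := out = solution_alt L S N
instance (L : Int) (S : List Int) (N : Int) (out : Int) : Decidable (Spec_solution L S N out) := by unfold Spec_solution; infer_instance

-- ===== CLAIM (what is proved, stated in full; the proofs are below) =====
def Claim_equal_solution : Prop := ∀ (L : Int) (S : List Int) (N : Int), Dom_solution L S N → Spec_solution L S N (solution L S N)

-- ===== LEMMAS AND PROOFS =====

-- B's hand-written loop is PySem's bisectLeft loop
theorem bsearchLoop_eq (xs : List Int) (x : Int) (fuel lo hi : Nat) :
    bsearchLoop xs x fuel lo hi = PySem.List.bisectLeftLoop xs x fuel lo hi := by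
  induction fuel generalizing lo hi with
  | zero => simp [bsearchLoop, PySem.List.bisectLeftLoop]
  | succ f ih =>
    simp only [bsearchLoop, PySem.List.bisectLeftLoop]
    split_ifs
    · cases xs[(lo + hi) / 2]? with
      | none => rfl
      | some y => by_cases hy : y < x <;> simp [hy, ih]
    · rfl

theorem bisectLeftB_eq (xs : List Int) (x : Int) :
    bisectLeftB xs x = PySem.List.bisectLeft xs x := by
  simp [bisectLeftB, PySem.List.bisectLeft, bsearchLoop_eq]

theorem foldl_max_const (L : List Int) (b : Int) (hb : ∀ y ∈ L, y ≤ b) :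
    L.foldl max b = b := by
  induction L generalizing b with
  | nil => rfl
  | cons x t ih =>
    have hx : x ≤ b := hb x (by simp)
    simp only [List.foldl_cons, max_eq_left hx]
    exact ih b (fun y hy => hb y (by simp [hy]))

theorem foldl_max_eq (L : List Int) (a m : Int) (hm : m ∈ L) (hb : ∀ y ∈ L, y ≤ m) :
    L.foldl max a = max a m := by
  induction L generalizing a with
  | nil => simp at hm
  | cons x t ih =>
    simp only [List.foldl_cons]
    rcases List.mem_cons.mp hm with h | h
    · subst h
      by_cases ht : m ∈ t
      · exact (ih (max a m) ht (fun y hy => hb y (by simp [hy]))).trans (by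
          rw [max_assoc, max_self])
      · rw [foldl_max_const t (max a m) (fun y hy =>
          le_trans (hb y (by simp [hy])) (le_max_right a m))]
    · have hx : x ≤ m := hb x (by simp)
      rw [ih (max a x) h (fun y hy => hb y (by simp [hy]))]
      rw [max_assoc, max_eq_right hx]

theorem foldl_min_const (L : List Int) (b : Int) (hb : ∀ y ∈ L, b ≤ y) :
    L.foldl min b = b := by
  induction L generalizing b with
  | nil => rfl
  | cons x t ih =>
    have hx : b ≤ x := hb x (by simp)
    simp only [List.foldl_cons, min_eq_left hx]
    exact ih b (fun y hy => hb y (by simp [hy]))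

theorem foldl_min_eq (L : List Int) (a m : Int) (hm : m ∈ L) (hb : ∀ y ∈ L, m ≤ y) :
    L.foldl min a = min a m := by
  induction L generalizing a with
  | nil => simp at hm
  | cons x t ih =>
    simp only [List.foldl_cons]
    rcases List.mem_cons.mp hm with h | h
    · subst h
      by_cases ht : m ∈ t
      · exact (ih (min a m) ht (fun y hy => hb y (by simp [hy]))).trans (by
          rw [min_assoc, min_self])
      · rw [foldl_min_const t (min a m) (fun y hy =>
          le_trans (min_le_right a m) (hb y (by simp [hy])))]
    · have hx : m ≤ x := hb x (by simp)
      rw [ih (min a x) h (fun y hy => hb y (by simp [hy]))]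
      rw [min_assoc, min_eq_right hx]

-- A's paired fold splits into two independent folds
theorem foldA_split (N : Int) (T : List Int) (a b : Int) :
    T.foldl (fun (lr : Int × Int) s =>
      if s < N then (max lr.1 s, lr.2)
      else if s > N then (lr.1, min lr.2 s)
      else lr) (a, b)
    = (T.foldl (fun a s => if s < N then max a s else a) a,
       T.foldl (fun b s => if s > N then min b s else b) b) := by
  induction T generalizing a b with
  | nil => rfl
  | cons x t ih =>
    simp only [List.foldl_cons]
    rcases lt_trichotomy x N with h | h | h
    · simp [h, asymm h, ih]
    · subst h; simp [ih]
    · simp [h, asymm h, ih]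

theorem foldl_if_lt_id (N : Int) (L : List Int) (a : Int) (h : ∀ s ∈ L, ¬ s < N) :
    L.foldl (fun a s => if s < N then max a s else a) a = a := by
  induction L generalizing a with
  | nil => rfl
  | cons x t ih =>
    simp only [List.foldl_cons, if_neg (h x (by simp))]
    exact ih a (fun s hs => h s (by simp [hs]))

theorem foldl_if_gt_id (N : Int) (L : List Int) (b : Int) (h : ∀ s ∈ L, ¬ s > N) :
    L.foldl (fun b s => if s > N then min b s else b) b = b := by
  induction L generalizing b with
  | nil => rfl
  | cons x t ih =>
    simp only [List.foldl_cons, if_neg (h x (by simp))]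
    exact ih b (fun s hs => h s (by simp [hs]))

theorem foldl_if_lt_max (N : Int) (L : List Int) (a : Int) (h : ∀ s ∈ L, s < N) :
    L.foldl (fun a s => if s < N then max a s else a) a = L.foldl max a := by
  induction L generalizing a with
  | nil => rfl
  | cons x t ih =>
    simp only [List.foldl_cons, if_pos (h x (by simp))]
    exact ih (max a x) (fun s hs => h s (by simp [hs]))

theorem foldl_if_gt_min (N : Int) (L : List Int) (b : Int) (h : ∀ s ∈ L, s > N) :
    L.foldl (fun b s => if s > N then min b s else b) b = L.foldl min b := by
  induction L generalizing b with
  | nil => rfl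
  | cons x t ih =>
    simp only [List.foldl_cons, if_pos (h x (by simp))]
    exact ih (min b x) (fun s hs => h s (by simp [hs]))

-- ===== VERDICT (by name: the statement is the Claim_ definition above) =====
theorem solution_spec : Claim_equal_solution := by
  intro L S N _
  unfold Spec_solution solution solution_alt
  simp only []
  set T := PySem.List.sorted S (fun x => x) false with hT
  have hpair : T.Pairwise (fun a b => a ≤ b) := PySem.List.sorted_pairwise S (fun x => x)
  have hmono : ∀ (p q : Nat) (hq : q < T.length) (hpq : p ≤ q),
      T[p]'(lt_of_le_of_lt hpq hq) ≤ T[q] := by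
    intro p q hq hpq
    rcases lt_or_eq_of_le hpq with h | h
    · exact (List.pairwise_iff_getElem.mp hpair) p q _ hq h
    · subst h; rfl
  set i := bisectLeftB T N with hi
  have hspec := PySem.List.bisectLeft_spec T N hpair
  rw [bisectLeftB_eq] at hi
  obtain ⟨hle, hlt, hge⟩ := hspec
  rw [← hi] at hle hlt hge
  by_cases hm : N ∈ T
  · -- N present: both sides return 0
    obtain ⟨j, hj, hjN⟩ := List.mem_iff_getElem.mp hm
    have hji : i ≤ j := by
      by_contra hlt'
      have := hlt j hj (by omega)
      omega
    have hin : i < T.length := by omega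
    have hTi : T[i]'hin = N := by
      have h1 : N ≤ T[i]'hin := hge i hin le_rfl
      have h2 : T[i]'hin ≤ T[j] := hmono i j hj hji
      omega
    have hBtrue : (decide (i < T.length) && (T[i]?.getD 0 == N)) = true := by
      simp [hin, hTi]
    rw [if_pos hm, hBtrue, if_pos rfl]
  · -- N absent: B's guard is false too
    have hBfalse : (decide (i < T.length) && (T[i]?.getD 0 == N)) = false := by
      by_cases hin : i < T.length
      · have : T[i]'hin ≠ N := fun h => hm (h ▸ List.getElem_mem hin)
        simp [hin, this]
      · simp [hin]
    rw [if_neg hm, hBfalse]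
    simp only [Bool.false_eq_true, if_false]
    have hgt : ∀ (j : Nat) (hj : j < T.length), i ≤ j → N < T[j] := by
      intro j hj hij
      have h1 := hge j hj hij
      have h2 : T[j] ≠ N := fun h => hm (h ▸ List.getElem_mem hj)
      omega
    have hsplit : T = T.take i ++ T.drop i := (List.take_append_drop i T).symm
    rw [foldA_split]
    conv_lhs => rw [hsplit]
    rw [List.foldl_append, List.foldl_append]
    have htake_lt : ∀ s ∈ T.take i, s < N := by
      intro s hs
      obtain ⟨j, hj, hjs⟩ := List.mem_iff_getElem.mp hs
      rw [List.length_take] at hj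
      have hjT : j < T.length := by omega
      rw [List.getElem_take] at hjs
      have := hlt j hjT (by omega)
      omega
    have hdrop_gt : ∀ s ∈ T.drop i, s > N := by
      intro s hs
      obtain ⟨j, hj, hjs⟩ := List.mem_iff_getElem.mp hs
      rw [List.length_drop] at hj
      have hjT : i + j < T.length := by omega
      rw [List.getElem_drop] at hjs
      have := hgt (i + j) hjT (by omega)
      omega
    rw [foldl_if_lt_max N _ 0 htake_lt,
        foldl_if_lt_id N _ _ (fun s hs => not_lt.mpr (le_of_lt (hdrop_gt s hs))),
        foldl_if_gt_id N _ 1001 (fun s hs => not_lt.mpr (le_of_lt (htake_lt s hs))),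
        foldl_if_gt_min N _ _ hdrop_gt]
    have hleft : (T.take i).foldl max 0 = (if 0 < i then max 0 (T[i-1]?.getD 0) else 0) := by
      by_cases hi0 : 0 < i
      · have hi1 : i - 1 < T.length := by omega
        rw [if_pos hi0, List.getElem?_eq_getElem hi1, Option.getD_some]
        apply foldl_max_eq
        · exact List.mem_iff_getElem.mpr ⟨i - 1, by rw [List.length_take]; omega,
            by rw [List.getElem_take]⟩
        · intro y hy
          obtain ⟨j, hj, hjs⟩ := List.mem_iff_getElem.mp hy
          rw [List.length_take] at hj
          rw [List.getElem_take] at hjs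
          rw [← hjs]
          exact hmono j (i - 1) hi1 (by omega)
      · rw [if_neg hi0]
        have : i = 0 := by omega
        simp [this]
    have hright : (T.drop i).foldl min 1001 = (if i < T.length then min 1001 (T[i]?.getD 0) else 1001) := by
      by_cases hin : i < T.length
      · rw [if_pos hin, List.getElem?_eq_getElem hin, Option.getD_some]
        apply foldl_min_eq
        · exact List.mem_iff_getElem.mpr ⟨0, by rw [List.length_drop]; omega,
            by simp⟩
        · intro y hy
          obtain ⟨j, hj, hjs⟩ := List.mem_iff_getElem.mp hy
          rw [List.length_drop] at hj
          rw [List.getElem_drop] at hjs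
          rw [← hjs]
          exact hmono i (i + j) (by omega) (by omega)
      · rw [if_neg hin]
        have : T.drop i = [] := List.drop_eq_nil_of_le (by omega)
        simp [this]
    rw [hleft, hright]
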